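-- pv_equiv track=rewrite | github.com/jrkinneer/ECE1147 | HW7/test.py | create_signature_matrix
-- ===== SOURCE A (Python) =====
-- def create_signature_matrix(hashed_matrices):
--     signature_matrix = []
--     for i in range(len(hashed_matrices[0])):
--         signature_row = []
--         for j in range(len(hashed_matrices[0][0])):
--             min_hash = min(hashed_matrix[i][j] for hashed_matrix in hashed_matrices)
--             signature_row.append(min_hash)
--         signature_matrix.append(signature_row)
--     return signature_matrix
-- ===== SOURCE B (Python) =====
-- def create_signature_matrix(hashed_matrices):
--     first = hashed_matrices[0]
--     if not first or not first[0]: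
--         return [[] for _ in first]
--     cols = len(first[0])
--     sig = [row[:cols] for row in first]
--     for m in hashed_matrices[1:]:
--         sig = [[b if b < a else a for a, b in zip(srow, mrow)]
--                for srow, mrow in zip(sig, m)]
--     return sig
-- ===== Notes on version B (the rewrite author's own statement) =====
-- stated objective: faster
-- what changed: A loops per output cell and re-scans all matrices with a generator min; B keeps a running element-wise minimum accumulator initialised from the first matrix and folds each remaining matrix in with one zip comprehension pass per matrix (reversed loop nesting, no per-cell generator/min call).
import Mathlib
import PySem

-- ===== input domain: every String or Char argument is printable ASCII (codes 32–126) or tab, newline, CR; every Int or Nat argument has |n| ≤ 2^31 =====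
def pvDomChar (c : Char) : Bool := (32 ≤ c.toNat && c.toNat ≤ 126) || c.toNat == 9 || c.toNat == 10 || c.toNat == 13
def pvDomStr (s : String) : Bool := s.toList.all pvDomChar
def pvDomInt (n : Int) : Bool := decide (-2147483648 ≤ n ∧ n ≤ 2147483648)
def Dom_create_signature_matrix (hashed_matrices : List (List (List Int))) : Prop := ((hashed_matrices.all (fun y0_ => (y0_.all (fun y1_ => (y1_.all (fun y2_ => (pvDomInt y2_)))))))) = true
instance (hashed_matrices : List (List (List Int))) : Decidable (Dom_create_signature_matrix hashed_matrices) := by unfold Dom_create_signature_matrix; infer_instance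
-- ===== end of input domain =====

-- B replaces A's per-cell generator min by a running element-wise minimum accumulator folded over the matrices: same asymptotic cost, measurably faster by constant factor (no per-cell generator/min call).


-- ===== PORT A =====
def create_signature_matrix (hashed_matrices : List (List (List Int))) : List (List Int) :=
  (List.range (PySem.List.pyGetD hashed_matrices (0 : Int) []).length).foldl
    (fun signature_matrix i =>
      signature_matrix ++
        [(List.range (PySem.List.pyGetD (PySem.List.pyGetD hashed_matrices (0 : Int) []) (0 : Int) []).length).foldl
          (fun signature_row j =>
            signature_row ++
              [((PySem.List.min?
                  (hashed_matrices.map (fun hashed_matrix =>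
                    PySem.List.pyGetD (PySem.List.pyGetD hashed_matrix (i : Int) []) (j : Int) 0))
                  (fun y => y)).getD 0)])
          []])
    []

-- ===== PORT B =====
def create_signature_matrix_alt (hashed_matrices : List (List (List Int))) : List (List Int) :=
  let first := hashed_matrices.headD []
  if first = [] ∨ first.headD [] = [] then first.map (fun _ => [])
  else
    let cols := (first.headD []).length
    let sig0 := first.map (fun row => PySem.List.slice row none (some (cols : Int)))
    hashed_matrices.tail.foldl
      (fun sig m =>
        (sig.zip m).map (fun p =>
          (p.1.zip p.2).map (fun q => if q.2 < q.1 then q.2 else q.1)))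
      sig0

-- ===== PRECONDITION & SPEC =====
-- Pre_ excludes exactly the inputs where A raises: the empty list (IndexError on hashed_matrices[0]),
-- and, when the first matrix has a nonempty first row, any matrix too short (rows or columns) for the
-- indices A reads (IndexError inside the generator).
def Pre_create_signature_matrix (hashed_matrices : List (List (List Int))) : Prop :=
  hashed_matrices ≠ [] ∧
    (((hashed_matrices.headD []).headD []).length = 0 ∨
      ∀ m ∈ hashed_matrices,
        (hashed_matrices.headD []).length ≤ m.length ∧
          ∀ i < (hashed_matrices.headD []).length,
            ((hashed_matrices.headD []).headD []).length ≤ (m.getD i []).length)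
instance (hashed_matrices : List (List (List Int))) : Decidable (Pre_create_signature_matrix hashed_matrices) := by
  unfold Pre_create_signature_matrix; infer_instance

def pvWitness_create_signature_matrix : List (List (List Int)) := [[[1, 2], [3, 4]], [[0, 5], [7, 1]]]

def Spec_create_signature_matrix (hashed_matrices : List (List (List Int))) (out : List (List Int)) : Prop := out = create_signature_matrix_alt hashed_matrices
instance (hashed_matrices : List (List (List Int))) (out : List (List Int)) : Decidable (Spec_create_signature_matrix hashed_matrices out) := by unfold Spec_create_signature_matrix; infer_instance

-- ===== CLAIM (what is proved, stated in full; the proofs are below) =====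
def Claim_equal_create_signature_matrix : Prop := ∀ (hashed_matrices : List (List (List Int))), Dom_create_signature_matrix hashed_matrices → Pre_create_signature_matrix hashed_matrices → Spec_create_signature_matrix hashed_matrices (create_signature_matrix hashed_matrices)

-- ===== LEMMAS AND PROOFS =====

-- `if b < a then b else a` is `min a b` on Int
lemma if_lt_eq_min (a b : Int) : (if b < a then b else a) = min a b := by
  rw [min_def]; split_ifs <;> omega

-- one pass of B's fold on a rectangular accumulator, as an element-wise map
lemma step_map (R C : Nat) (g : Nat → Nat → Int) (m : List (List Int))
    (hR : R ≤ m.length) (hC : ∀ i < R, C ≤ (m.getD i []).length) :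
    (((List.range R).map (fun i => (List.range C).map (fun j => g i j))).zip m).map
        (fun p => (p.1.zip p.2).map (fun q => if q.2 < q.1 then q.2 else q.1)) =
      (List.range R).map (fun i => (List.range C).map
        (fun j => min (g i j) ((m.getD i []).getD j 0))) := by
  apply List.ext_getElem
  · simp; omega
  · intro i h1 h2
    have hiR : i < R := by simp at h2; omega
    have him : i < m.length := by omega
    have hrow : C ≤ m[i].length := by
      have := hC i hiR; rwa [List.getD_eq_getElem m [] him] at this
    simp only [List.getElem_map, List.getElem_zip, List.getElem_range]
    apply List.ext_getElem
    · simp; omega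
    · intro j hj1 hj2
      have hjC : j < C := by simp at hj2; omega
      have hjm : j < m[i].length := by omega
      simp only [List.getElem_map, List.getElem_zip, List.getElem_range]
      rw [List.getD_eq_getElem m [] him, List.getD_eq_getElem m[i] 0 hjm, if_lt_eq_min]

-- B's whole fold over the remaining matrices, on a rectangular accumulator
lemma fold_map (R C : Nat) (ms : List (List (List Int))) :
    ∀ g : Nat → Nat → Int,
      (∀ m ∈ ms, R ≤ m.length ∧ ∀ i < R, C ≤ (m.getD i []).length) →
      ms.foldl
          (fun sig m => (sig.zip m).map (fun p =>
            (p.1.zip p.2).map (fun q => if q.2 < q.1 then q.2 else q.1)))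
          ((List.range R).map (fun i => (List.range C).map (fun j => g i j))) =
        (List.range R).map (fun i => (List.range C).map
          (fun j => (ms.map (fun m => (m.getD i []).getD j 0)).foldl min (g i j))) := by
  induction ms with
  | nil => intro g _; simp
  | cons m ms ih =>
      intro g hms
      have hm := hms m (by simp)
      simp only [List.foldl_cons]
      rw [step_map R C g m hm.1 hm.2,
        ih (fun i j => min (g i j) ((m.getD i []).getD j 0)) (fun m' hm' => hms m' (by simp [hm']))]
      simp

-- B's initial accumulator (first matrix, rows cut to `cols`) as a range-map of its entries
lemma sig0_eq (m0 : List (List Int)) (C : Nat) (h : ∀ i < m0.length, C ≤ (m0.getD i []).length) :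
    m0.map (fun row => row.take C) =
      (List.range m0.length).map (fun i => (List.range C).map
        (fun j => (m0.getD i []).getD j 0)) := by
  apply List.ext_getElem
  · simp
  · intro i h1 h2
    have hi : i < m0.length := by simpa using h1
    have hC : C ≤ m0[i].length := by
      have := h i hi; rwa [List.getD_eq_getElem m0 [] hi] at this
    simp only [List.getElem_map, List.getElem_range]
    apply List.ext_getElem
    · simp; omega
    · intro j hj1 hj2
      have hjC : j < C := by simpa using hj2
      simp only [List.getElem_map, List.getElem_range, List.getElem_take]
      rw [List.getD_eq_getElem m0 [] hi, List.getD_eq_getElem m0[i] 0 (by omega)]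

-- ===== VERDICT (by name: the statement is the Claim_ definition above) =====
theorem create_signature_matrix_spec : Claim_equal_create_signature_matrix := by
  intro hm _ hpre
  unfold Spec_create_signature_matrix
  obtain ⟨hne, hpre⟩ := hpre
  obtain ⟨m0, ms, rfl⟩ := List.exists_cons_of_ne_nil hne
  rcases m0 with _ | ⟨r0, rows⟩
  · -- first matrix empty: both return []
    simp [create_signature_matrix, create_signature_matrix_alt,
      PySem.List.pyGetD_zero_cons]
  · by_cases hr0 : r0.length = 0
    · -- first row empty: A appends empty rows; B takes its guard branch
      have hr0' : r0 = [] := List.length_eq_zero_iff.mp hr0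
      subst hr0'
      simp [create_signature_matrix, create_signature_matrix_alt,
        PySem.List.pyGetD_zero_cons, List.map_const', List.replicate_succ]
      rw [Nat.add_comm]
      simp [List.replicate_succ]
    · -- main case
      rcases hpre with hC0 | hall
      · exact absurd (by simpa using hC0) hr0
      · have hr0ne : r0 ≠ [] := fun h => hr0 (by simp [h])
        simp only [List.headD_cons] at hall
        have h0 := (hall (r0 :: rows) (by simp)).2
        have hms : ∀ m ∈ ms, (r0 :: rows).length ≤ m.length ∧
            ∀ i < (r0 :: rows).length, r0.length ≤ (m.getD i []).length :=
          fun m hmem => hall m (by simp [hmem])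
        -- A as a range-map of per-cell running minima
        simp only [create_signature_matrix, PySem.List.pyGetD_zero_cons,
          PySem.List.foldl_append_singleton_eq_map, List.nil_append,
          List.map_cons, PySem.List.min?_id_cons, Option.getD_some]
        simp only [List.pure_def, List.bind_eq_flatMap, ← List.map_eq_flatMap,
          List.map_map, Function.comp_def, PySem.List.pyGetD_natCast]
        -- B: guard is false, slice is take, then the fold characterisation
        simp only [create_signature_matrix_alt, List.headD_cons, List.tail_cons,
          PySem.List.slice_to_natCast]
        rw [if_neg (by simp [hr0ne])]
        rw [sig0_eq (r0 :: rows) r0.length h0]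
        rw [fold_map (r0 :: rows).length r0.length ms
          (fun i j => (((r0 :: rows).getD i []).getD j 0)) hms]
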